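-- pv_equiv track=rewrite | github.com/Hegemege/advent-of-code-2019 | 04/solution.py | password_is_valid_part2
-- ===== SOURCE A (Python) =====
-- def password_is_valid_part2(password):
--     password = str(password)
--     # Check duplicate adjacent and non-decreasing values
--     adjacent = False
--     adjacent_count = 1
--     previous = None
--     for symbol in password:
--         if symbol == previous:
--             adjacent_count += 1
--         else:
--             # Numbers change in the middle - condition satisfied if it was exactly 2 long
--             if adjacent_count == 2:
--                 adjacent = True
--             adjacent_count = 1
--         if previous is not None and symbol < previous:
--             return False
--         previous = symbol
--     # End of number can also contain one with 2 adjacent, so detect them here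
--     return adjacent or adjacent_count == 2
-- ===== SOURCE B (Python) =====
-- def password_is_valid_part2(password):
--     s = str(password)
--     if list(s) != sorted(s):
--         return False
--     runs = []
--     i = 0
--     while i < len(s):
--         j = i
--         while j < len(s) and s[j] == s[i]:
--             j += 1
--         runs.append(j - i)
--         i = j
--     return 2 in runs
-- ===== Notes on version B (the rewrite author's own statement) =====
-- stated objective: idiomatic
-- what changed: Replaces A's single-pass running-counter state machine with early return by a whole-string sortedness check (s == sorted(s)) followed by an explicit run-length decomposition queried for a run of exactly 2.
import Mathlib
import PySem

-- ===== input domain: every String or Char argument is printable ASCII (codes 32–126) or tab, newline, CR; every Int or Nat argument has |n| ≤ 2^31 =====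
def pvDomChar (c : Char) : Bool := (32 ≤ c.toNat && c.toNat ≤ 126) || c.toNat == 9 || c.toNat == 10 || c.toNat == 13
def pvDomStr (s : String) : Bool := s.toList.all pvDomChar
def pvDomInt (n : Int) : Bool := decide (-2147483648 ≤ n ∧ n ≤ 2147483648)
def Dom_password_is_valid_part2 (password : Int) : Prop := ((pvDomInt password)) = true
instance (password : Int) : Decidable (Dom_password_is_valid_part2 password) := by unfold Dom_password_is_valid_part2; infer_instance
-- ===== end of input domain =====

-- B replaces A's running-counter state machine (with early return) by a whole-string sortedness check
-- followed by an explicit run-length decomposition queried for a run of length exactly 2 (idiomatic).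

-- ===== PORT A =====
-- the for-loop over str(password): state (adjacent, adjacent_count, previous); 'false' mid-loop is the literal 'return False'
def pvLoopA : List Char → Bool → Int → Option Char → Bool
  | [], adj, cnt, _ => adj || cnt == 2
  | c :: rest, adj, cnt, prev =>
    let st : Bool × Int :=
      if prev == some c then (adj, cnt + 1)
      else (if cnt == 2 then true else adj, 1)
    match prev with
    | some pr => if c < pr then false else pvLoopA rest st.1 st.2 (some c)
    | none => pvLoopA rest st.1 st.2 (some c)

def password_is_valid_part2 (password : Int) : Bool :=
  pvLoopA (PySem.Int.toChars password) false 1 none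

-- ===== PORT B =====
-- the while loops of Source B: split s into maximal runs of equal chars, record each run's length
def pvRuns : List Char → List Nat
  | [] => []
  | c :: rest =>
    (1 + (rest.takeWhile (fun x => x == c)).length) :: pvRuns (rest.dropWhile (fun x => x == c))
  termination_by l => l.length
  decreasing_by simp; exact List.length_dropWhile_le _ _

def password_is_valid_part2_alt (password : Int) : Bool :=
  let s := PySem.Int.toChars password
  if s ≠ PySem.List.sorted s (fun x => x) false then false
  else (pvRuns s).contains 2

-- ===== PRECONDITION & SPEC =====
def Spec_password_is_valid_part2 (password : Int) (out : Bool) : Prop := out = password_is_valid_part2_alt password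
instance (password : Int) (out : Bool) : Decidable (Spec_password_is_valid_part2 password out) := by unfold Spec_password_is_valid_part2; infer_instance

-- ===== CLAIM (what is proved, stated in full; the proofs are below) =====
def Claim_equal_password_is_valid_part2 : Prop := ∀ (password : Int), Dom_password_is_valid_part2 password → Spec_password_is_valid_part2 password (password_is_valid_part2 password)

-- ===== LEMMAS AND PROOFS =====

lemma pvRuns_nil : pvRuns [] = [] := by rw [pvRuns]

lemma pvRuns_cons (c : Char) (rest : List Char) :
    pvRuns (c :: rest)
      = (1 + (rest.takeWhile (fun x => x == c)).length)
          :: pvRuns (rest.dropWhile (fun x => x == c)) := by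
  rw [pvRuns]

lemma run2_cast (n : Nat) : ((1 + (n:Int)) == 2) = ((2:Nat) == 1 + n) := by
  rcases eq_or_ne n 1 with h | h
  · simp [h]
  · have h1 : ((1 + (n:Int)) == 2) = false := by simp; omega
    have h2 : (((2:Nat)) == 1 + n) = false := by simp; omega
    rw [h1, h2]

-- B's "remaining answer" seen from the middle of a run: current char p seen cnt times so far
def pvBFrom (p : Char) (cnt : Int) (l : List Char) : Bool :=
  (cnt + ((l.takeWhile (fun x => x == p)).length : Int) == 2)
    || (pvRuns (l.dropWhile (fun x => x == p))).contains 2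

-- "the rest of the string is non-decreasing starting from p" as a Bool
def pvNondecr : Char → List Char → Bool
  | _, [] => true
  | p, c :: rest => decide (p ≤ c) && pvNondecr c rest

lemma pvLoopA_char (l : List Char) : ∀ (p : Char) (adj : Bool) (cnt : Int),
    pvLoopA l adj cnt (some p) = (pvNondecr p l && (adj || pvBFrom p cnt l)) := by
  induction l with
  | nil =>
    intro p adj cnt
    simp [pvLoopA, pvNondecr, pvBFrom, pvRuns_nil]
  | cons c rest ih =>
    intro p adj cnt
    by_cases hpc : p = c
    · subst hpc
      simp only [pvLoopA, beq_self_eq_true, lt_irrefl]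
      rw [ih]
      have h3 : cnt + 1 + ((rest.takeWhile (fun x => x == p)).length : Int)
          = cnt + (((rest.takeWhile (fun x => x == p)).length : Int) + 1) := by ring
      simp [pvNondecr, pvBFrom, h3]
    · have hne : (some p == some c) = false := by simp [hpc]
      by_cases hlt : c < p
      · simp [pvLoopA, hlt, pvNondecr, not_le.mpr hlt]
      · have hle : p ≤ c := le_of_not_gt hlt
        simp only [pvLoopA, hne, Bool.false_eq_true, if_false, if_neg hlt]
        rw [ih]
        have htw : (c :: rest).takeWhile (fun x => x == p) = [] := by
          simp [List.takeWhile, beq_eq_false_iff_ne.mpr (Ne.symm hpc)]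
        have hdw : (c :: rest).dropWhile (fun x => x == p) = c :: rest := by
          simp [List.dropWhile, beq_eq_false_iff_ne.mpr (Ne.symm hpc)]
        simp only [pvBFrom, htw, hdw, pvNondecr, pvRuns_cons, List.contains_cons, hle,
          decide_true, Bool.true_and, List.length_nil, Nat.cast_zero, add_zero]
        rw [run2_cast]
        cases hb : (cnt == 2 : Bool)
        · simp [hb]
        · simp [hb, Bool.or_comm, Bool.or_left_comm, Bool.or_assoc]

lemma pvNondecr_iff (l : List Char) : ∀ p : Char,
    pvNondecr p l = true ↔ List.IsChain (· ≤ ·) (p :: l) := by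
  induction l with
  | nil => intro p; simp [pvNondecr]
  | cons c rest ih =>
    intro p
    simp [pvNondecr, List.isChain_cons_cons, ih]

lemma pvSorted_iff (c : Char) (rest : List Char) :
    pvNondecr c rest = true ↔ c :: rest = PySem.List.sorted (c :: rest) (fun x => x) false := by
  rw [pvNondecr_iff, List.isChain_iff_pairwise]
  constructor
  · intro h
    exact (PySem.List.sorted_eq_self_of_pairwise _ _ h).symm
  · intro h
    rw [h]
    exact PySem.List.sorted_pairwise _ (fun x => x)

-- ===== VERDICT (by name: the statement is the Claim_ definition above) =====
theorem password_is_valid_part2_spec : Claim_equal_password_is_valid_part2 := by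
  intro password _
  show password_is_valid_part2 password = password_is_valid_part2_alt password
  unfold password_is_valid_part2 password_is_valid_part2_alt
  cases h : PySem.Int.toChars password with
  | nil => simp [pvLoopA, pvRuns_nil, PySem.List.sorted]
  | cons c rest =>
    have hn : ((none : Option Char) == some c) = false := rfl
    simp only [pvLoopA, hn, Bool.false_eq_true, if_false]
    rw [pvLoopA_char]
    by_cases hs : pvNondecr c rest = true
    · have he := (pvSorted_iff c rest).mp hs
      simp only [hs, Bool.true_and, ← he, ne_eq, not_true_eq_false, pvBFrom,
        pvRuns_cons, List.contains_cons]
      rw [run2_cast]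
      simp
    · have he : ¬ (c :: rest = PySem.List.sorted (c :: rest) (fun x => x) false) :=
        fun h' => hs ((pvSorted_iff c rest).mpr h')
      simp [Bool.eq_false_iff.mpr hs, he]
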